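-- pv_equiv track=rewrite | github.com/MIchael-wufan/shushi | division_vertical_mcp/decimal_math.py | _divisor_leading_zeros_before_dot
-- ===== SOURCE A (Python) =====
-- def _divisor_leading_zeros_before_dot(full: str) -> int:
--     """从串首起连续 '0'，遇 '.' 或非 '0' 数字即停（不划有效数位）。"""
--     n = 0
--     for ch in full:
--         if ch == "0":
--             n += 1
--         elif ch == ".":
--             break
--         else:
--             break
--     return n
-- ===== SOURCE B (Python) =====
-- def _divisor_leading_zeros_before_dot(full: str) -> int:
--     # Divide and conquer: split the string in half; if the leading-'0' run
--     # ends inside the left half, that count is the answer, otherwise it is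
--     # mid plus the count of the right half. (Stopping at '.' or any non-'0'
--     # digit is the same as stopping at any non-'0' character.)
--     n = len(full)
--     if n <= 1:
--         return 1 if full == "0" else 0
--     mid = n // 2
--     left = _divisor_leading_zeros_before_dot(full[:mid])
--     if left < mid:
--         return left
--     return mid + _divisor_leading_zeros_before_dot(full[mid:])
-- ===== Notes on version B (the rewrite author's own statement) =====
-- stated objective: alternative
-- what changed: Replaces A's linear left-to-right counting loop by a divide-and-conquer recursion: split the string at the midpoint, recurse on the left half, and only recurse on the right half when the leading-zero run fills the whole left half.
import Mathlib
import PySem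

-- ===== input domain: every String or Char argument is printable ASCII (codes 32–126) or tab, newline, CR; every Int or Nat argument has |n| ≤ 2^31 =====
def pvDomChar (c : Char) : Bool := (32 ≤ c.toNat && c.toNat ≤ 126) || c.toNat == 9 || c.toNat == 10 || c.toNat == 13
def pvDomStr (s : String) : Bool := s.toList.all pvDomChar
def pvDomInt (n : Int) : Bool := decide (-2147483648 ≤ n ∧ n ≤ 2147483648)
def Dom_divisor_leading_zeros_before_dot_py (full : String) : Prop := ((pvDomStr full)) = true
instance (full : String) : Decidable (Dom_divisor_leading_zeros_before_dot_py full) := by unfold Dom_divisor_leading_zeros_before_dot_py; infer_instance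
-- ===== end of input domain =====

-- B replaces A's linear counting loop by a divide-and-conquer recursion on string halves; same result, different algorithm.

-- ===== PORT A =====
-- the for-loop with break: count '0's, stop at '.' or any other char
def divisorLZLoop : List Char → Int → Int
  | [], n => n
  | ch :: rest, n =>
    if ch == '0' then divisorLZLoop rest (n + 1)
    else if ch == '.' then n          -- break
    else n                            -- break

def divisor_leading_zeros_before_dot_py (full : String) : Int :=
  divisorLZLoop full.toList 0

-- ===== PORT B =====
-- Source B's divide-and-conquer on the code points: full[:mid] / full[mid:] are take/drop.
-- fuel = an upper bound on the length, only to make the halving recursion structural; never reached 0 when fuel ≥ length.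
def lzDCgo (fuel : Nat) (cs : List Char) : Int :=
  match fuel with
  | 0 => 0
  | fuel + 1 =>
    if cs.length ≤ 1 then
      if cs = ['0'] then 1 else 0
    else
      let mid := cs.length / 2
      let left := lzDCgo fuel (cs.take mid)
      if left < (mid : Int) then left
      else (mid : Int) + lzDCgo fuel (cs.drop mid)

def divisor_leading_zeros_before_dot_py_alt (full : String) : Int :=
  lzDCgo full.toList.length full.toList

-- ===== PRECONDITION & SPEC =====
def Spec_divisor_leading_zeros_before_dot_py (full : String) (out : Int) : Prop := out = divisor_leading_zeros_before_dot_py_alt full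
instance (full : String) (out : Int) : Decidable (Spec_divisor_leading_zeros_before_dot_py full out) := by unfold Spec_divisor_leading_zeros_before_dot_py; infer_instance

-- ===== CLAIM (what is proved, stated in full; the proofs are below) =====
def Claim_equal_divisor_leading_zeros_before_dot_py : Prop := ∀ (full : String), Dom_divisor_leading_zeros_before_dot_py full → Spec_divisor_leading_zeros_before_dot_py full (divisor_leading_zeros_before_dot_py full)

-- ===== LEMMAS AND PROOFS =====
-- A's loop counts the leading run of '0's (the '.'-break and the other break coincide)
theorem divisorLZLoop_eq (cs : List Char) (n : Int) :
    divisorLZLoop cs n = n + ((cs.takeWhile (· == '0')).length : Int) := by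
  induction cs generalizing n with
  | nil => simp [divisorLZLoop]
  | cons c rest ih =>
    by_cases h : c = '0'
    · subst h
      simp [divisorLZLoop, List.takeWhile, ih]
      omega
    · have hc : (c == '0') = false := by simp [h]
      simp [divisorLZLoop, List.takeWhile, hc]

-- B's divide and conquer computes the same leading-run length (whenever the fuel covers the length)
theorem lzDCgo_eq (n : Nat) : ∀ cs : List Char, cs.length ≤ n →
    lzDCgo n cs = ((cs.takeWhile (· == '0')).length : Int) := by
  induction n with
  | zero =>
    intro cs hcs
    have : cs = [] := List.eq_nil_of_length_eq_zero (by omega)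
    subst this; simp [lzDCgo]
  | succ n ih =>
    intro cs hcs
    rw [lzDCgo]
    by_cases hsmall : cs.length ≤ 1
    · simp only [hsmall, if_true]
      match cs with
      | [] => simp
      | [c] =>
        by_cases h : c = '0' <;> simp [h]
      | _ :: _ :: _ => simp at hsmall
    · simp only [hsmall, if_false]
      have h2 : 2 ≤ cs.length := by omega
      set mid := cs.length / 2 with hmid
      have hmid1 : 1 ≤ mid := by omega
      have hmidlt : mid < cs.length := by omega
      have htl : (cs.take mid).length = mid := by simp; omega
      rw [ih (cs.take mid) (by simp; omega), ih (cs.drop mid) (by simp; omega)]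
      have htw : cs.takeWhile (· == '0') = (cs.take mid ++ cs.drop mid).takeWhile (· == '0') := by
        rw [List.take_append_drop]
      rw [htw, List.takeWhile_append]
      have hle : ((cs.take mid).takeWhile (· == '0')).length ≤ mid := by
        have := (List.takeWhile_sublist (l := cs.take mid) (· == '0')).length_le
        omega
      by_cases hfull : ((cs.take mid).takeWhile (· == '0')).length = (cs.take mid).length
      · -- the left half is all zeros: the run spans into the right half
        simp only [hfull, htl, if_true]
        rw [if_neg (lt_irrefl _), List.length_append, htl]
        push_cast
        ring
      · have hlt : ((cs.take mid).takeWhile (· == '0')).length < mid := by omega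
        simp only [if_neg hfull]
        rw [if_pos (by exact_mod_cast hlt)]

-- ===== VERDICT (by name: the statement is the Claim_ definition above) =====
theorem divisor_leading_zeros_before_dot_py_spec : Claim_equal_divisor_leading_zeros_before_dot_py := by
  intro full _
  show _ = _
  rw [divisor_leading_zeros_before_dot_py, divisor_leading_zeros_before_dot_py_alt,
    divisorLZLoop_eq, lzDCgo_eq full.toList.length full.toList le_rfl]
  ring
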